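-- pv_equiv track=rewrite | github.com/divyanshisaini100/Python-Playground | count_vow_conso_in_even_indices /function.py | count_vowels_and_consonants_in_even_indices
-- ===== SOURCE A (Python) =====
-- import string
--
-- def count_vowels_and_consonants_in_even_indices(s : str) :
--     # even_str = s[::2] can eliminate this line (MORE EFFICIENT)
--     vowel = 0
--     conso = 0
--     for i in s[::2].lower():    #include lower() here so don't have to include again n again
--         if i in 'aeiou':
--             vowel += 1
--         elif i in string.ascii_lowercase:  #or simply (w/o importing string)......... " i.isalpha() "....best for CHECK!(BEST HERE)
--             conso += 1
--         # else:
--         #     pass  (NO NEED)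
--     return (vowel, conso)
-- ===== SOURCE B (Python) =====
-- import string
--
-- def count_vowels_and_consonants_in_even_indices(s: str):
--     # Table-first: tally the even-index (lowered) characters once, then read the
--     # tallies off a fixed alphabet instead of branching per character.
--     cnt = {}
--     for ch in s[::2].lower():
--         cnt[ch] = cnt.get(ch, 0) + 1
--     vowel = sum(cnt.get(v, 0) for v in 'aeiou')
--     conso = sum(cnt.get(c, 0) for c in string.ascii_lowercase if c not in 'aeiou')
--     return (vowel, conso)
-- ===== Notes on version B (the rewrite author's own statement) =====
-- stated objective: alternative
-- what changed: B builds a frequency table of the even-index lowered characters in one pass and then sums the tallies over the fixed lowercase alphabet (vowels vs non-vowels), instead of A's per-character if/elif branching with two running counters.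
import Mathlib
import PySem

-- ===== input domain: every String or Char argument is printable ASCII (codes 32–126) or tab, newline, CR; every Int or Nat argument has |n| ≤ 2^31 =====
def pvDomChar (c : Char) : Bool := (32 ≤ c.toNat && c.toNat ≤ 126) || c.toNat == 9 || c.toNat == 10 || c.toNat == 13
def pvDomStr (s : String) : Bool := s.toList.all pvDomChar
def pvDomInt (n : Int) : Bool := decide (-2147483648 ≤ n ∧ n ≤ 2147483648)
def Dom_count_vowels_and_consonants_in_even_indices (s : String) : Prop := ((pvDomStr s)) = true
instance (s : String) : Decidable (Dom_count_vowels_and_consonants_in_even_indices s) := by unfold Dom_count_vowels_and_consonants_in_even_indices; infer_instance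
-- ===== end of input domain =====

-- B tallies the even-index lowered characters into a counter once, then sums the tallies
-- over the fixed lowercase alphabet (vowels vs non-vowels) instead of A's per-character
-- if/elif branching with two running counters (alternative decomposition, same cost).

-- ===== PORT A =====
def count_vowels_and_consonants_in_even_indices (s : String) : Int × Int :=
  -- for i in s[::2].lower(): if i in 'aeiou': vowel += 1 elif i in ascii_lowercase: conso += 1
  (PySem.Chars.lower ((PySem.List.slice? s.toList none none 2).getD [])).foldl
    (fun (p : Int × Int) i =>
      if "aeiou".toList.contains i then (p.1 + 1, p.2)
      else if "abcdefghijklmnopqrstuvwxyz".toList.contains i then (p.1, p.2 + 1)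
      else p)
    (0, 0)

-- ===== PORT B =====
def pvVowels : List Char := "aeiou".toList
def pvAsciiLowercase : List Char := "abcdefghijklmnopqrstuvwxyz".toList

def count_vowels_and_consonants_in_even_indices_alt (s : String) : Int × Int :=
  let cnt := PySem.Dict.counter (PySem.Chars.lower ((PySem.List.slice? s.toList none none 2).getD []))
  let vowel := (pvVowels.map (fun v => cnt.getD v 0)).sum
  let conso := ((pvAsciiLowercase.filter (fun c => !(pvVowels.contains c))).map
      (fun c => cnt.getD c 0)).sum
  (vowel, conso)

-- ===== PRECONDITION & SPEC =====
def Spec_count_vowels_and_consonants_in_even_indices (s : String) (out : Int × Int) : Prop := out = count_vowels_and_consonants_in_even_indices_alt s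
instance (s : String) (out : Int × Int) : Decidable (Spec_count_vowels_and_consonants_in_even_indices s out) := by unfold Spec_count_vowels_and_consonants_in_even_indices; infer_instance

-- ===== CLAIM (what is proved, stated in full; the proofs are below) =====
def Claim_equal_count_vowels_and_consonants_in_even_indices : Prop := ∀ (s : String), Dom_count_vowels_and_consonants_in_even_indices s → Spec_count_vowels_and_consonants_in_even_indices s (count_vowels_and_consonants_in_even_indices s)

-- ===== LEMMAS AND PROOFS =====

-- A's two-counter loop computes the countP's of its two branch tests.
theorem pv_loop_eq (p q : Char → Bool) (l : List Char) (a b : Int) :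
    l.foldl
      (fun (acc : Int × Int) i =>
        if p i then (acc.1 + 1, acc.2)
        else if q i then (acc.1, acc.2 + 1)
        else acc)
      (a, b)
    = (a + (l.countP p : Int), b + (l.countP (fun i => !p i && q i) : Int)) := by
  induction l generalizing a b with
  | nil => simp
  | cons x l ih =>
    simp only [List.foldl_cons]
    by_cases hp : p x = true
    · rw [if_pos hp, ih]
      simp only [List.countP_cons, hp, Bool.not_true, Bool.false_and, if_true,
        Prod.mk.injEq]
      constructor <;> push_cast <;> ring
    · by_cases hq : q x = true
      · rw [if_neg (by simp [hp]), if_pos hq, ih]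
        simp only [Bool.not_eq_true] at hp
        simp only [List.countP_cons, hp, hq, Bool.not_false, Bool.true_and, if_true,
          Prod.mk.injEq]
        constructor <;> push_cast <;> ring
      · rw [if_neg (by simp [hp]), if_neg (by simp [hq]), ih]
        simp [hp, hq]

-- counting matches of a key list member-by-member splits off the head key when absent from the tail
theorem pv_countP_cons_key (k : Char) (ks : List Char) (hk : k ∉ ks) (l : List Char) :
    l.countP (fun x => (k :: ks).contains x)
      = l.count k + l.countP (fun x => ks.contains x) := by
  induction l with
  | nil => simp
  | cons y l ihl =>
    simp only [List.contains_eq_mem, List.mem_cons] at ihl ⊢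
    rw [List.countP_cons, List.countP_cons, List.count_cons, ihl]
    by_cases hyk : y = k
    · subst hyk
      simp [hk]
      omega
    · simp only [hyk, decide_eq_true_eq]
      by_cases hin : y ∈ ks <;> simp [hin, hyk] <;> omega

-- summing per-key counts over a duplicate-free key list is counting membership
theorem pv_sum_count (ks : List Char) (hks : ks.Nodup) (l : List Char) :
    ((ks.map (fun k => (l.count k : Int))).sum) = (l.countP (fun x => ks.contains x) : Int) := by
  induction ks with
  | nil => simp
  | cons k ks ih =>
    rcases List.nodup_cons.mp hks with ⟨hk, hnd⟩
    rw [List.map_cons, List.sum_cons, ih hnd, pv_countP_cons_key k ks hk l]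
    push_cast; ring

theorem pv_main (s : String) :
    count_vowels_and_consonants_in_even_indices s
      = count_vowels_and_consonants_in_even_indices_alt s := by
  unfold count_vowels_and_consonants_in_even_indices count_vowels_and_consonants_in_even_indices_alt
  dsimp only
  rw [pv_loop_eq]
  have hv : ((pvVowels.map (fun v =>
        (PySem.Dict.counter (PySem.Chars.lower ((PySem.List.slice? s.toList none none 2).getD []))).getD v 0)).sum)
      = ((PySem.Chars.lower ((PySem.List.slice? s.toList none none 2).getD [])).countP
          (fun x => pvVowels.contains x) : Int) := by
    simp only [PySem.Dict.getD_counter]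
    exact pv_sum_count pvVowels (by decide) _
  have hc : (((pvAsciiLowercase.filter (fun c => !(pvVowels.contains c))).map (fun c =>
        (PySem.Dict.counter (PySem.Chars.lower ((PySem.List.slice? s.toList none none 2).getD []))).getD c 0)).sum)
      = ((PySem.Chars.lower ((PySem.List.slice? s.toList none none 2).getD [])).countP
          (fun x => !(pvVowels.contains x) && pvAsciiLowercase.contains x) : Int) := by
    simp only [PySem.Dict.getD_counter]
    rw [pv_sum_count _ (List.Nodup.filter _ (by decide)) _]
    congr 1
    apply List.countP_congr
    intro x _
    simp only [List.contains_eq_mem, List.mem_filter, decide_eq_true_eq]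
    by_cases h1 : x ∈ pvAsciiLowercase <;> by_cases h2 : x ∈ pvVowels <;> simp [h1, h2]
  rw [hv, hc]
  simp only [pvVowels, pvAsciiLowercase, zero_add]

-- ===== VERDICT (by name: the statement is the Claim_ definition above) =====
theorem count_vowels_and_consonants_in_even_indices_spec : Claim_equal_count_vowels_and_consonants_in_even_indices := by
  intro s _
  exact pv_main s
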